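-- pv_equiv track=rewrite | github.com/yfoucade/challenge_mastermind | player.py | is_possible_combo
-- ===== SOURCE A (Python) =====
-- def is_possible_combo(proposition, response, combo):
-- 	mask1 = mask2 = [a == b for a,b in zip(proposition, combo)]
-- 	if sum(mask1) != response[0]:
-- 		return False
-- 	misplaced = 0
-- 	for i, letter1 in enumerate(proposition):
-- 		if mask1[i]:
-- 			continue
-- 		for j, letter2 in enumerate(combo):
-- 			if letter1 == letter2 and (letter2 != proposition[j] or mask1[j]) and not mask2[j]:
-- 				mask2[j] = 1
-- 				misplaced += 1
-- 				break
-- 	return misplaced == response[1]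
-- ===== SOURCE B (Python) =====
-- def is_possible_combo(proposition, response, combo):
--     if sum(a == b for a, b in zip(proposition, combo)) != response[0]:
--         return False
--     pool = [(a, b) for a, b in zip(proposition, combo) if a != b]
--     misplaced = 0
--     k = 0
--     while k < len(pool):
--         guess = pool[k][0]
--         hit = next((j for j, pair in enumerate(pool) if pair[1] == guess), None)
--         if hit is None:
--             k += 1
--         else:
--             del pool[hit]
--             misplaced += 1
--             if hit > k:
--                 k += 1
--     return misplaced == response[1]
-- ===== Notes on version B (the rewrite author's own statement) =====
-- stated objective: alternative
-- what changed: A keeps two aliased boolean masks over the fixed arrays and rescans the whole combo with index bookkeeping inside a loop over the guess; B distils the non-exact (guess, secret) pairs into one shrinking worklist walked by a cursor, pairing each pending guess with the first entry that carries its letter and deleting claimed entries, so the masks and the per-index guards disappear.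
-- outside the precondition, e.g. on is_possible_combo([1], [1], [1]): A raises IndexError, B raises IndexError; on is_possible_combo([], [0, 0], [1]): A returns True, B returns True
import Mathlib
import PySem

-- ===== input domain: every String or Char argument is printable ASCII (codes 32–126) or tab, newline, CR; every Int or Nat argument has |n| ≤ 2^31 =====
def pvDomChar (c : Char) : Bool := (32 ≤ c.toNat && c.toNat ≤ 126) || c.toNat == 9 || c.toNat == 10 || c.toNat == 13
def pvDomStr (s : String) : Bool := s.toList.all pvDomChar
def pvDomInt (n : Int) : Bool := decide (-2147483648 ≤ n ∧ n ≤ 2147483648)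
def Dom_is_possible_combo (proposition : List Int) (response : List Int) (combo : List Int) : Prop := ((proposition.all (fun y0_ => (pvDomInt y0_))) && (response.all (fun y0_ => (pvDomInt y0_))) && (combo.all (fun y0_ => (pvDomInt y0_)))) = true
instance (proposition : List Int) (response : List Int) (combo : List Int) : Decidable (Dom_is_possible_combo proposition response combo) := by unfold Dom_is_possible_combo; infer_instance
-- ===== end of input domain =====

-- B replaces A's two aliased masks and nested index bookkeeping by one shrinking worklist of
-- the non-exact (guess, secret) pairs, walked by a cursor; same return value on every input
-- admitted by Pre_ (same greedy pairing, including its shared-consumption behaviour).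

-- ===== PORT A =====
-- In the Python, mask1 and mask2 are the SAME list object ('mask1 = mask2 = […]'); the port
-- keeps the single mask. Python writes the int 1 where the port writes true (same truthiness).
-- Inner loop 'for j, letter2 in enumerate(combo)': proposition[j] is always in range whenever
-- it is evaluated under Pre_, so pyGetD's default is unreachable there.
def pvFindA (letter1 : Int) (p : List Int) (mask : List Bool) : Nat → List Int → Option Nat
  | _, [] => none
  | j, letter2 :: rest =>
    if letter1 == letter2 && ((letter2 != PySem.List.pyGetD p (j : Int) 0) || mask.getD j false)
        && !(mask.getD j false)
    then some j
    else pvFindA letter1 p mask (j+1) rest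

-- outer loop 'for i, letter1 in enumerate(proposition)'; mask1[i] is in range under Pre_
def pvLoopA (p c : List Int) : Nat → List Int → List Bool → Nat → Nat
  | _, [], _, misplaced => misplaced
  | i, letter1 :: rest, mask, misplaced =>
    if mask.getD i false then pvLoopA p c (i+1) rest mask misplaced
    else match pvFindA letter1 p mask 0 c with
      | none => pvLoopA p c (i+1) rest mask misplaced
      | some j => pvLoopA p c (i+1) rest (mask.set j true) (misplaced+1)

def is_possible_combo (proposition : List Int) (response : List Int) (combo : List Int) : Bool :=
  let mask := (proposition.zip combo).map (fun ab => ab.1 == ab.2)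
  match PySem.List.pyGet? response 0 with
  | none => false  -- Python raises IndexError here (excluded by Pre_)
  | some r0 =>
    if ((mask.count true : Int) != r0) then false
    else
      match PySem.List.pyGet? response 1 with
      | none => false  -- Python raises IndexError here (excluded by Pre_)
      | some r1 => ((pvLoopA proposition combo 0 proposition mask 0 : Nat) : Int) == r1

-- ===== PORT B =====
-- 'next((j for j, pair in enumerate(pool) if pair[1] == guess), None)'
def pvHit (guess : Int) : List (Int × Int) → Option Nat
  | [] => none
  | pair :: rest => if pair.2 == guess then some 0 else (pvHit guess rest).map (· + 1)

theorem pvHit_lt_length (guess : Int) : ∀ (pool : List (Int × Int)) (hit : Nat),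
    pvHit guess pool = some hit → hit < pool.length := by
  intro pool
  induction pool with
  | nil => intro hit h; simp [pvHit] at h
  | cons pair rest ih =>
    intro hit h
    unfold pvHit at h
    simp only [List.length_cons]
    split at h
    · simp at h
      omega
    · cases hh : pvHit guess rest with
      | none => rw [hh] at h; simp at h
      | some m =>
        rw [hh] at h
        simp at h
        have := ih m hh
        omega

-- 'while k < len(pool): …' with 'del pool[hit]' and the cursor adjustment
def pvLoopB (pool : List (Int × Int)) (k misplaced : Nat) : Nat :=
  if h : k < pool.length then
    match hh : pvHit (pool[k]).1 pool with
    | none => pvLoopB pool (k + 1) misplaced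
    | some hit =>
      if hit > k then pvLoopB (pool.eraseIdx hit) (k + 1) (misplaced + 1)
      else pvLoopB (pool.eraseIdx hit) k (misplaced + 1)
  else misplaced
termination_by (pool.length, pool.length - k)
decreasing_by
  · exact Prod.Lex.right _ (by omega)
  · have := pvHit_lt_length (pool[k]).1 pool hit hh
    exact Prod.Lex.left _ _ (by simp [List.length_eraseIdx, this]; omega)
  · have := pvHit_lt_length (pool[k]).1 pool hit hh
    exact Prod.Lex.left _ _ (by simp [List.length_eraseIdx, this]; omega)

def is_possible_combo_alt (proposition : List Int) (response : List Int) (combo : List Int) : Bool :=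
  match PySem.List.pyGet? response 0 with
  | none => false  -- IndexError
  | some r0 =>
    if (((proposition.zip combo).countP fun ab => ab.1 == ab.2 : Nat) : Int) != r0 then false
    else
      let pool := (proposition.zip combo).filter fun ab => !(ab.1 == ab.2)
      match PySem.List.pyGet? response 1 with
      | none => false  -- IndexError
      | some r1 => ((pvLoopB pool 0 0 : Nat) : Int) == r1

-- ===== PRECONDITION & SPEC =====
-- Pre_ excludes exactly the inputs on which the Python A raises an IndexError (empty response;
-- missing response[1] once the exact-count test passes) together with the length-mismatched
-- inputs that reach the misplaced loop: there A indexes past the shorter list and usually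
-- raises, data-dependently (mastermind compares equal-length codes).
def Pre_is_possible_combo (proposition : List Int) (response : List Int) (combo : List Int) : Prop :=
  response ≠ [] ∧
  ((((proposition.zip combo).countP (fun ab => ab.1 == ab.2) : Int) = response.getD 0 0) →
    (proposition.length = combo.length ∧ 2 ≤ response.length))
instance (proposition : List Int) (response : List Int) (combo : List Int) : Decidable (Pre_is_possible_combo proposition response combo) := by unfold Pre_is_possible_combo; infer_instance

def pvWitness_is_possible_combo : List Int × List Int × List Int := ([1, 2], [0, 1], [2, 1])

def Spec_is_possible_combo (proposition : List Int) (response : List Int) (combo : List Int) (out : Bool) : Prop := out = is_possible_combo_alt proposition response combo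
instance (proposition : List Int) (response : List Int) (combo : List Int) (out : Bool) : Decidable (Spec_is_possible_combo proposition response combo out) := by unfold Spec_is_possible_combo; infer_instance

-- ===== CLAIM (what is proved, stated in full; the proofs are below) =====
def Claim_equal_is_possible_combo : Prop := ∀ (proposition : List Int) (response : List Int) (combo : List Int), Dom_is_possible_combo proposition response combo → Pre_is_possible_combo proposition response combo → Spec_is_possible_combo proposition response combo (is_possible_combo proposition response combo)

-- ===== LEMMAS AND PROOFS =====

-- intermediate description of the shared greedy: positions j0, j0+1, … of the non-exact pairs
-- of zs whose secret letter is a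
def pvPosFrom (a : Int) : Nat → List (Int × Int) → List Nat
  | _, [] => []
  | j, xy :: rest =>
    if xy.2 = a ∧ xy.1 ≠ xy.2 then j :: pvPosFrom a (j+1) rest else pvPosFrom a (j+1) rest

-- the greedy over indices with one set of consumed positions (proof-side intermediate)
def pvGreedyGo (zs : List (Int × Int)) : Nat → List (Int × Int) → PySem.Set Nat → Nat → Nat
  | _, [], _, mis => mis
  | i, ab :: rest, used, mis =>
    if ab.1 == ab.2 || used.contains i then pvGreedyGo zs (i+1) rest used mis
    else match (pvPosFrom ab.1 0 zs).filter (fun j => !used.contains j) with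
      | [] => pvGreedyGo zs (i+1) rest used mis
      | j :: _ => pvGreedyGo zs (i+1) rest (used.add j) (mis+1)

-- the indexed non-exact pairs, and those not yet consumed
def pvW (z : List (Int × Int)) : List ((Int × Int) × Nat) :=
  z.zipIdx.filter fun q => !(q.1.1 == q.1.2)
def pvPool (z : List (Int × Int)) (used : PySem.Set Nat) : List ((Int × Int) × Nat) :=
  (pvW z).filter fun q => !used.contains q.2


-- ---- facts about pvPosFrom (positions of non-exact pairs with a given secret letter) ----
theorem pvPosFrom_ge (a : Int) : ∀ (zs : List (Int × Int)) (j0 x : Nat),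
    x ∈ pvPosFrom a j0 zs → j0 ≤ x := by
  intro zs
  induction zs with
  | nil => intro j0 x h; simp [pvPosFrom] at h
  | cons xy rest ih =>
    intro j0 x h
    unfold pvPosFrom at h
    split at h
    · rcases List.mem_cons.mp h with rfl | h
      · exact le_refl _
      · exact Nat.le_of_succ_le (ih _ _ h)
    · exact Nat.le_of_succ_le (ih _ _ h)

theorem pvPosFrom_mem_aux (a : Int) : ∀ (zs : List (Int × Int)) (j0 x : Nat),
    x ∈ pvPosFrom a j0 zs →
    x - j0 < zs.length ∧ (zs.getD (x - j0) (0,0)).2 = a ∧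
      (zs.getD (x - j0) (0,0)).1 ≠ (zs.getD (x - j0) (0,0)).2 := by
  intro zs
  induction zs with
  | nil => intro j0 x h; simp [pvPosFrom] at h
  | cons xy rest ih =>
    intro j0 x h
    unfold pvPosFrom at h
    have step : x ∈ pvPosFrom a (j0+1) rest →
        x - j0 < (xy :: rest).length ∧ ((xy :: rest).getD (x - j0) (0,0)).2 = a ∧
        ((xy :: rest).getD (x - j0) (0,0)).1 ≠ ((xy :: rest).getD (x - j0) (0,0)).2 := by
      intro h'
      have hge := pvPosFrom_ge a rest (j0+1) x h'
      obtain ⟨h1, h2, h3⟩ := ih (j0+1) x h'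
      have hx : x - j0 = (x - (j0+1)) + 1 := by omega
      rw [hx]
      simpa using ⟨by omega, h2, h3⟩
    split at h
    · rcases List.mem_cons.mp h with rfl | h
      · obtain ⟨h1,h2⟩ := ‹xy.2 = a ∧ xy.1 ≠ xy.2›
        subst h1
        simpa using h2
      · exact step h
    · exact step h

theorem pvPosFrom_mem (a : Int) : ∀ (zs : List (Int × Int)) (x : Nat),
    x ∈ pvPosFrom a 0 zs →
    x < zs.length ∧ (zs.getD x (0,0)).2 = a ∧ (zs.getD x (0,0)).1 ≠ (zs.getD x (0,0)).2 := by
  intro zs x h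
  simpa using pvPosFrom_mem_aux a zs 0 x h

theorem pvMaskCount (zs : List (Int × Int)) :
    (zs.map (fun ab => ab.1 == ab.2)).count true = zs.countP (fun ab => ab.1 == ab.2) := by
  induction zs with
  | nil => rfl
  | cons xy rest ih =>
    by_cases h : xy.1 = xy.2 <;> simp [List.count_cons, List.countP_cons, h, ih]

-- ---- the A-side simulation: pvLoopA (mask) = pvGreedyGo (consumed-position set) ----
def pvInv (zs : List (Int × Int)) (mask : List Bool) (used : PySem.Set Nat) : Prop :=
  mask.length = zs.length ∧
  (∀ j, (h : j < zs.length) → mask.getD j false = (decide (zs[j].1 = zs[j].2) || used.contains j)) ∧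
  (∀ j, j ∈ used → j < zs.length ∧ (zs.getD j (0,0)).1 ≠ (zs.getD j (0,0)).2)

theorem pvInv_init (pl cl : List Int) :
    pvInv (pl.zip cl) ((pl.zip cl).map (fun ab => ab.1 == ab.2)) PySem.Set.empty := by
  refine ⟨by simp, ?_, ?_⟩
  · intro j h
    have hj1 : j < pl.length := by have := List.length_zip (l₁ := pl) (l₂ := cl); omega
    have hj2 : j < cl.length := by have := List.length_zip (l₁ := pl) (l₂ := cl); omega
    rw [List.getD_eq_getElem _ _ (by simpa using h)]
    by_cases hpc : pl[j] = cl[j] <;> simp [pysem, hpc]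
  · intro j h
    simp [PySem.Set.empty] at h

theorem pvFindA_spec (pl cl : List Int) (mask : List Bool) (used : PySem.Set Nat) (l1 : Int)
    (hlen : pl.length = cl.length)
    (hm : ∀ j, (h : j < (pl.zip cl).length) →
      mask.getD j false = (decide ((pl.zip cl)[j].1 = (pl.zip cl)[j].2) || used.contains j)) :
    ∀ (cs : List Int) (j0 : Nat), cl.drop j0 = cs →
    pvFindA l1 pl mask j0 cs =
      ((pvPosFrom l1 j0 ((pl.zip cl).drop j0)).filter (fun j => !used.contains j)).head? := by
  intro cs
  induction cs with
  | nil =>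
    intro j0 hdrop
    have hcl : cl.length ≤ j0 := by
      by_contra hlt
      have := congrArg List.length hdrop
      simp at this
      omega
    have hz : (pl.zip cl).drop j0 = [] := by
      apply List.drop_eq_nil_of_le
      simp [List.length_zip]
      omega
    simp [pvFindA, hz, pvPosFrom]
  | cons l2 cs' ih =>
    intro j0 hdrop
    have hj0c : j0 < cl.length := by
      by_contra hge
      rw [List.drop_eq_nil_of_le (by omega)] at hdrop
      exact (List.cons_ne_nil _ _) hdrop.symm
    have hj0p : j0 < pl.length := by omega
    have hj0z : j0 < (pl.zip cl).length := by
      simp [List.length_zip]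
      omega
    have hdc : cl.drop j0 = cl[j0] :: cl.drop (j0+1) := List.drop_eq_getElem_cons hj0c
    have hl2 : cl[j0] = l2 := by
      rw [hdrop] at hdc
      exact (List.cons_eq_cons.mp hdc.symm).1
    have hcs' : cl.drop (j0+1) = cs' := by
      rw [hdrop] at hdc
      exact (List.cons_eq_cons.mp hdc.symm).2
    have hdz : (pl.zip cl).drop j0 = (pl[j0], cl[j0]) :: (pl.zip cl).drop (j0+1) := by
      rw [List.drop_eq_getElem_cons hj0z]
      simp
    have hmj' : mask.getD j0 false = (decide (pl[j0] = cl[j0]) || used.contains j0) := by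
      simpa using hm j0 hj0z
    have hpg : PySem.List.pyGetD pl ((j0 : Nat) : Int) 0 = pl[j0] := by
      simp [pysem, hj0p]
    have hih := ih (j0+1) hcs'
    rw [hdz]
    unfold pvFindA pvPosFrom
    rw [hpg, hmj', hl2]
    by_cases he : l1 = l2
    · by_cases hex : pl[j0] = l2
      · have hA : (l1 == l2 && ((l2 != pl[j0]) || (decide (pl[j0] = l2) || used.contains j0))
            && !(decide (pl[j0] = l2) || used.contains j0)) = false := by
          simp [hex]
        rw [hA]
        rw [if_neg (by simp), if_neg (fun hcon => hcon.2 hex)]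
        exact hih
      · by_cases hu : j0 ∈ used
        · have hcu : used.contains j0 = true := by simpa [pysem] using hu
          have hA : (l1 == l2 && ((l2 != pl[j0]) || (decide (pl[j0] = l2) || used.contains j0))
              && !(decide (pl[j0] = l2) || used.contains j0)) = false := by
            have hm1 : (decide (pl[j0] = l2) || used.contains j0) = true := by
              simp
              exact Or.inr hu
            simp
            exact fun _ _ _ => hu
          rw [hA]
          rw [if_neg (by simp), if_pos (by exact ⟨he.symm, fun h => hex h⟩)]
          simp only [List.filter_cons, hcu, Bool.not_true, Bool.false_eq_true, if_false]
          exact hih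
        · have hcu : used.contains j0 = false := by
            simp [pysem]
            exact hu
          have hA : (l1 == l2 && ((l2 != pl[j0]) || (decide (pl[j0] = l2) || used.contains j0))
              && !(decide (pl[j0] = l2) || used.contains j0)) = true := by
            have hne : (l2 != pl[j0]) = true := by
              simp only [bne_iff_ne, ne_eq]
              exact fun h => hex h.symm
            simp [he, hne]
            exact ⟨hex, hu⟩
          rw [hA]
          rw [if_pos rfl, if_pos (by exact ⟨he.symm, fun h => hex h⟩)]
          simp only [List.filter_cons, hcu, Bool.not_false, if_true, List.head?_cons]
    · have hA : (l1 == l2 && ((l2 != pl[j0]) || (decide (pl[j0] = l2) || used.contains j0))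
          && !(decide (pl[j0] = l2) || used.contains j0)) = false := by
        simp [he]
      rw [hA]
      rw [if_neg (by simp), if_neg (fun h => he (And.left h).symm)]
      exact hih

theorem pvInv_step (zs : List (Int × Int)) (mask : List Bool) (used : PySem.Set Nat)
    (l1 : Int) (j : Nat) (q : List Nat)
    (hInv : pvInv zs mask used)
    (hfl : (pvPosFrom l1 0 zs).filter (fun x => !used.contains x) = j :: q) :
    pvInv zs (mask.set j true) (used.add j) := by
  obtain ⟨h1, h2, h3⟩ := hInv
  have hjmem : j ∈ pvPosFrom l1 0 zs ∧ (!used.contains j) = true := by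
    have : j ∈ (pvPosFrom l1 0 zs).filter (fun x => !used.contains x) := by
      rw [hfl]; exact List.mem_cons_self
    exact ⟨(List.mem_filter.mp this).1, (List.mem_filter.mp this).2⟩
  obtain ⟨hjp, hju⟩ := hjmem
  obtain ⟨hjlt, hja, hjne⟩ := pvPosFrom_mem l1 zs j hjp
  have hcontains : ∀ x : Nat, (used.add j).contains x = (used.contains x || (x == j)) := by
    intro x
    by_cases hx : x ∈ used <;> by_cases hxj : x = j <;>
      simp [pysem, PySem.Set.mem_add, hx, hxj]
  refine ⟨by simpa using h1, ?_, ?_⟩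
  · intro i hi
    have hi' : i < (mask.set j true).length := by simpa [h1] using hi
    rw [List.getD_eq_getElem _ _ hi', List.getElem_set]
    by_cases hij : j = i
    · subst hij
      simp [hcontains, pysem]
    · rw [if_neg hij, ← List.getD_eq_getElem _ _ (by simpa [h1] using hi), h2 i hi, hcontains]
      have hne : (i == j) = false := by simpa using fun h => hij h.symm
      simp [hne]
  · intro i hi
    rcases (PySem.Set.mem_add used j i).mp hi with hi' | rfl
    · exact h3 i hi'
    · exact ⟨hjlt, hjne⟩

theorem pvLoop_sim (pl cl : List Int) (hlen : pl.length = cl.length) :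
    ∀ (ps : List Int) (i : Nat) (mask : List Bool) (used : PySem.Set Nat) (mis : Nat),
    pl.drop i = ps → pvInv (pl.zip cl) mask used →
    pvLoopA pl cl i ps mask mis = pvGreedyGo (pl.zip cl) i ((pl.zip cl).drop i) used mis := by
  intro ps
  induction ps with
  | nil =>
    intro i mask used mis hdrop hInv
    have hple : pl.length ≤ i := by
      by_contra hlt
      have := congrArg List.length hdrop
      simp at this
      omega
    have hz : (pl.zip cl).drop i = [] := by
      apply List.drop_eq_nil_of_le
      simp [List.length_zip]
      omega
    rw [hz]
    rfl
  | cons l1 rest ih =>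
    intro i mask used mis hdrop hInv
    obtain ⟨h1, h2, h3⟩ := hInv
    have hip : i < pl.length := by
      by_contra hge
      rw [List.drop_eq_nil_of_le (by omega)] at hdrop
      exact (List.cons_ne_nil _ _) hdrop.symm
    have hic : i < cl.length := by omega
    have hiz : i < (pl.zip cl).length := by
      simp [List.length_zip]
      omega
    have hdp : pl.drop i = pl[i] :: pl.drop (i+1) := List.drop_eq_getElem_cons hip
    have hl1 : pl[i] = l1 := by
      rw [hdrop] at hdp
      exact (List.cons_eq_cons.mp hdp.symm).1
    have hrest : pl.drop (i+1) = rest := by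
      rw [hdrop] at hdp
      exact (List.cons_eq_cons.mp hdp.symm).2
    have hdz : (pl.zip cl).drop i = (pl[i], cl[i]) :: (pl.zip cl).drop (i+1) := by
      rw [List.drop_eq_getElem_cons hiz]
      simp
    have hmi : mask.getD i false = (decide (pl[i] = cl[i]) || used.contains i) := by
      simpa using h2 i hiz
    rw [hdz]
    show pvLoopA pl cl i (l1 :: rest) mask mis = _
    unfold pvLoopA pvGreedyGo
    rw [hmi, hl1]
    by_cases hex : l1 = cl[i]
    · simp only [hex, decide_true, Bool.true_or, if_true, beq_self_eq_true, Bool.true_or, if_true]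
      rw [ih (i+1) mask used mis hrest ⟨h1, h2, h3⟩]
    · have hbe : (l1 == cl[i]) = false := by simpa using hex
      by_cases hu : used.contains i
      · simp only [hex, decide_false, Bool.false_or, hu, if_true, hbe, Bool.false_or]
        rw [ih (i+1) mask used mis hrest ⟨h1, h2, h3⟩]
      · simp only [hex, decide_false, Bool.false_or, hu, if_false, hbe,
          Bool.false_eq_true, if_false]
        have hfind := pvFindA_spec pl cl mask used l1 hlen
          (by intro j h; exact h2 j (by simpa [List.length_zip] using h)) cl 0 rfl
        simp only [List.drop_zero] at hfind
        rw [hfind]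
        cases hfl : (pvPosFrom l1 0 (pl.zip cl)).filter (fun x => !used.contains x) with
        | nil =>
          simp only [List.head?_nil]
          rw [ih (i+1) mask used mis hrest ⟨h1, h2, h3⟩]
        | cons j q =>
          simp only [List.head?_cons]
          rw [ih (i+1) (mask.set j true) (used.add j) (mis+1) hrest
            (pvInv_step (pl.zip cl) mask used l1 j q ⟨h1, h2, h3⟩ hfl)]

-- ---- B-side bridge lemmas ----
theorem pvZipIdx_pairwise (l : List (Int × Int)) : ∀ n : Nat,
    (l.zipIdx n).Pairwise (fun x y => x.2 < y.2) := by
  induction l with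
  | nil => intro n; simp
  | cons a rest ih =>
    intro n
    rw [List.zipIdx_cons]
    refine List.Pairwise.cons ?_ (ih (n+1))
    intro y hy
    have := List.le_snd_of_mem_zipIdx hy
    simpa using by omega

theorem pvPool_pairwise (z : List (Int × Int)) (used : PySem.Set Nat) :
    (pvPool z used).Pairwise (fun x y => x.2 < y.2) := by
  have hs : (pvPool z used).Sublist (z.zipIdx 0) := by
    unfold pvPool pvW
    exact List.Sublist.trans List.filter_sublist List.filter_sublist
  exact (pvZipIdx_pairwise z 0).sublist hs

theorem pvPool_snd_lt (z : List (Int × Int)) (used : PySem.Set Nat) :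
    ∀ q ∈ pvPool z used, q.2 < z.length := by
  intro q hq
  have hq' : q ∈ z.zipIdx := by
    have := (List.mem_filter.mp hq).1
    exact (List.mem_filter.mp this).1
  have := List.snd_lt_of_mem_zipIdx hq'
  omega

theorem pvPosFrom_zipIdx (a : Int) : ∀ (z : List (Int × Int)) (n : Nat),
    pvPosFrom a n z = ((z.zipIdx n).filter fun q => !(q.1.1 == q.1.2) && q.1.2 == a).map (·.2) := by
  intro z
  induction z with
  | nil => intro n; simp [pvPosFrom]
  | cons xy rest ih =>
    intro n
    rw [List.zipIdx_cons]
    unfold pvPosFrom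
    by_cases h : xy.2 = a ∧ xy.1 ≠ xy.2
    · rw [if_pos h]
      have h2 : (xy.1 == xy.2) = false := by simpa using h.2
      have hb : (!(xy.1 == xy.2) && (xy.2 == a)) = true := by rw [h2]; simp [h.1]
      simp only [List.filter_cons, hb, if_true, List.map_cons]
      exact congrArg (List.cons n) (ih (n+1))
    · rw [if_neg h]
      have hb : (!(xy.1 == xy.2) && (xy.2 == a)) = false := by
        by_cases h1 : xy.2 = a <;> by_cases h2 : xy.1 = xy.2 <;> simp [h1, h2] <;>
          exact absurd ⟨h1, h2⟩ h
      simp only [List.filter_cons, hb, Bool.false_eq_true, if_false]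
      exact ih (n+1)

theorem pvSpecList (z : List (Int × Int)) (used : PySem.Set Nat) (a : Int) :
    (pvPosFrom a 0 z).filter (fun j => !used.contains j)
      = ((pvPool z used).filter fun q => q.1.2 == a).map (·.2) := by
  rw [pvPosFrom_zipIdx, List.filter_map]
  unfold pvPool pvW
  simp only [List.filter_filter]
  congr 1
  apply List.filter_congr
  intro x _
  simp [Function.comp]
  cases used.contains x.2 <;> cases (x.1.1 == x.1.2) <;> cases (x.1.2 == a) <;> simp

theorem pvHit_append (a : Int) : ∀ (xs ys : List (Int × Int)),
    pvHit a (xs ++ ys) = (match pvHit a xs with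
      | some h => some h
      | none => (pvHit a ys).map (· + xs.length)) := by
  intro xs ys
  induction xs with
  | nil =>
    simp only [List.nil_append, pvHit, List.length_nil]
    cases pvHit a ys <;> simp
  | cons x rest ih =>
    by_cases hx : x.2 == a
    · have h1 : pvHit a ((x :: rest) ++ ys) = some 0 := by simp [pvHit, hx, List.cons_append]
      have h2 : pvHit a (x :: rest) = some 0 := by simp [pvHit, hx]
      rw [h1, h2]
    · have h1 : pvHit a ((x :: rest) ++ ys) = (pvHit a (rest ++ ys)).map (· + 1) := by
        simp [pvHit, hx, List.cons_append]
      have h2 : pvHit a (x :: rest) = (pvHit a rest).map (· + 1) := by simp [pvHit, hx]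
      rw [h1, h2, ih]
      cases pvHit a rest with
      | some h => simp
      | none =>
        cases hy : pvHit a ys with
        | none => simp
        | some m =>
          simp only [Option.map_some, Option.map_none, Option.some.injEq, List.length_cons]
          omega

theorem pvHit_none_iff (a : Int) : ∀ (l : List (Int × Int)),
    pvHit a l = none ↔ l.filter (fun x => x.2 == a) = [] := by
  intro l
  induction l with
  | nil => simp [pvHit]
  | cons x rest ih =>
    unfold pvHit
    by_cases hx : x.2 == a
    · simp [hx]
    · simp only [hx, Bool.false_eq_true, if_false, List.filter_cons]
      rw [← ih]
      cases pvHit a rest <;> simp [hx]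

theorem pvHit_eraseIdx (a : Int) : ∀ (l : List (Int × Int)) (hit : Nat),
    pvHit a l = some hit → l.eraseIdx hit = l.eraseP (fun x => x.2 == a) := by
  intro l
  induction l with
  | nil => intro hit h; simp [pvHit] at h
  | cons x rest ih =>
    intro hit h
    unfold pvHit at h
    by_cases hx : x.2 == a
    · rw [if_pos hx] at h
      have : hit = 0 := by simpa using h.symm
      subst this
      simp [List.eraseIdx, List.eraseP_cons, hx]
    · rw [if_neg hx] at h
      cases hh : pvHit a rest with
      | none => rw [hh] at h; simp at h
      | some m =>
        rw [hh] at h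
        simp only [hh, Option.map_some] at h
        have : hit = m + 1 := by simpa using h.symm
        subst this
        simp [List.eraseIdx_cons_succ, List.eraseP_cons, hx, ih m hh]

theorem pvErasePIdx {pr : ((Int × Int) × Nat) → Bool} :
    ∀ (X : List ((Int × Int) × Nat)), X.Pairwise (fun x y => x.2 < y.2) →
    ∀ q, X.find? pr = some q → X.eraseP pr = X.filter fun x => !(x.2 == q.2) := by
  intro X
  induction X with
  | nil => intro _ q h; simp at h
  | cons x rest ih =>
    intro hp q hf
    by_cases hx : pr x
    · rw [List.find?_cons_of_pos hx] at hf
      have hxq : x = q := by simpa using hf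
      subst hxq
      rw [List.eraseP_cons_of_pos hx]
      have h1 : (!(x.2 == x.2)) = false := by simp
      simp only [List.filter_cons, h1, Bool.false_eq_true, if_false]
      refine (List.filter_eq_self.mpr ?_).symm
      intro y hy
      have := (List.pairwise_cons.mp hp).1 y hy
      simpa using by omega
    · rw [List.find?_cons_of_neg hx] at hf
      have hq : q ∈ rest := List.mem_of_find?_eq_some hf
      have hlt : x.2 < q.2 := (List.pairwise_cons.mp hp).1 q hq
      have h1 : (!(x.2 == q.2)) = true := by simpa using by omega
      rw [List.eraseP_cons_of_neg hx]
      simp only [List.filter_cons, h1, if_true]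
      rw [ih (List.pairwise_cons.mp hp).2 q hf]

theorem pvSplitAt : ∀ (X : List ((Int × Int) × Nat)) (e : (Int × Int) × Nat), e ∈ X →
    X.Pairwise (fun x y => x.2 < y.2) →
    X = (X.filter fun q => decide (q.2 < e.2)) ++ e :: (X.filter fun q => decide (e.2 < q.2)) := by
  intro X
  induction X with
  | nil => intro e he; simp at he
  | cons x rest ih =>
    intro e he hp
    have hrest := (List.pairwise_cons.mp hp).2
    rcases List.mem_cons.mp he with rfl | he'
    · have hlt : ∀ y ∈ rest, e.2 < y.2 := (List.pairwise_cons.mp hp).1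
      have h1 : (decide (e.2 < e.2)) = false := by simp
      have h2 : rest.filter (fun q => decide (q.2 < e.2)) = [] := by
        rw [List.filter_eq_nil_iff]
        intro y hy
        have := hlt y hy
        simpa using by omega
      have h3 : rest.filter (fun q => decide (e.2 < q.2)) = rest := by
        apply List.filter_eq_self.mpr
        intro y hy
        simpa using hlt y hy
      simp only [List.filter_cons, h1, Bool.false_eq_true, if_false, h2, h3,
        List.nil_append]
    · have hlt : x.2 < e.2 := (List.pairwise_cons.mp hp).1 e he'
      have h1 : (decide (x.2 < e.2)) = true := by simpa using hlt
      have h2 : (decide (e.2 < x.2)) = false := by simpa using by omega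
      simp only [List.filter_cons, h1, if_true, h2, Bool.false_eq_true, if_false,
        List.cons_append]
      exact congrArg (x :: ·) (ih e he' hrest)

theorem pvPool_add (z : List (Int × Int)) (used : PySem.Set Nat) (j : Nat) :
    pvPool z (used.add j) = (pvPool z used).filter fun q => !(q.2 == j) := by
  unfold pvPool
  rw [List.filter_filter]
  apply List.filter_congr
  intro x _
  have hcontains : (used.add j).contains x.2 = (used.contains x.2 || (x.2 == j)) := by
    by_cases hx : x.2 ∈ used <;> by_cases hxj : x.2 = j <;>
      simp [pysem, PySem.Set.mem_add, hx, hxj]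
  rw [hcontains]
  cases used.contains x.2 <;> cases (x.2 == j) <;> simp

theorem pvPool_empty (z : List (Int × Int)) : pvPool z PySem.Set.empty = pvW z := by
  unfold pvPool
  apply List.filter_eq_self.mpr
  intro q _
  simp [pysem, PySem.Set.empty]

theorem pvW_map_fst (z : List (Int × Int)) :
    (pvW z).map (·.1) = z.filter fun ab => !(ab.1 == ab.2) := by
  unfold pvW
  have : ∀ (l : List (Int × Int)) (n : Nat),
      ((l.zipIdx n).filter fun q => !(q.1.1 == q.1.2)).map (·.1)
        = l.filter fun ab => !(ab.1 == ab.2) := by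
    intro l
    induction l with
    | nil => intro n; simp
    | cons xy rest ih =>
      intro n
      rw [List.zipIdx_cons]
      by_cases h : (xy.1 == xy.2)
      · simp only [List.filter_cons, h, Bool.not_true, Bool.false_eq_true, if_false]
        exact ih (n+1)
      · have hb : (!(xy.1 == xy.2)) = true := by simp [h]
        simp only [List.filter_cons]
        simp only [hb, if_true, List.map_cons]
        rw [ih]
  exact this z 0

theorem pvPool_at (z : List (Int × Int)) (used : PySem.Set Nat) {q : (Int × Int) × Nat}
    (hq : q ∈ pvPool z used) :
    z[q.2]? = some q.1 ∧ (q.1.1 == q.1.2) = false ∧ used.contains q.2 = false := by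
  have h2 : (!used.contains q.2) = true := (List.mem_filter.mp hq).2
  have hqW : q ∈ pvW z := (List.mem_filter.mp hq).1
  have h1 : (!(q.1.1 == q.1.2)) = true := (List.mem_filter.mp hqW).2
  have hz : q ∈ z.zipIdx := (List.mem_filter.mp hqW).1
  obtain ⟨qa, qn⟩ := q
  exact ⟨List.mk_mem_zipIdx_iff_getElem?.mp hz, by simpa using h1, by simpa using h2⟩

theorem pvPool_mem_self (z : List (Int × Int)) (used : PySem.Set Nat) (i : Nat)
    (hip : i < z.length) (hex : (z[i].1 == z[i].2) = false) (hu : used.contains i = false) :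
    (z[i], i) ∈ pvPool z used := by
  refine List.mem_filter.mpr ⟨List.mem_filter.mpr ⟨?_, by simpa using hex⟩, by simpa using hu⟩
  exact List.mk_mem_zipIdx_iff_getElem?.mpr (List.getElem?_eq_getElem hip)

theorem pvLoopB_none (pool : List (Int × Int)) (k mis : Nat) (h : k < pool.length)
    (hh : pvHit (pool[k]).1 pool = none) : pvLoopB pool k mis = pvLoopB pool (k+1) mis := by
  rw [pvLoopB, dif_pos h]
  split
  · rfl
  · rename_i hit heq
    rw [hh] at heq
    exact absurd heq (by simp)

theorem pvLoopB_some (pool : List (Int × Int)) (k mis hit : Nat) (h : k < pool.length)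
    (hh : pvHit (pool[k]).1 pool = some hit) :
    pvLoopB pool k mis = (if hit > k then pvLoopB (pool.eraseIdx hit) (k + 1) (mis + 1)
      else pvLoopB (pool.eraseIdx hit) k (mis + 1)) := by
  rw [pvLoopB, dif_pos h]
  split
  · rename_i heq
    rw [hh] at heq
    exact absurd heq (by simp)
  · rename_i hit' heq
    rw [hh] at heq
    have : hit = hit' := by simpa using heq
    subst this
    rfl

theorem pvB_sim (z : List (Int × Int)) :
    ∀ (suf : List (Int × Int)) (i : Nat) (used : PySem.Set Nat) (mis : Nat), z.drop i = suf →
    pvLoopB ((pvPool z used).map (·.1)) ((pvPool z used).countP fun q => decide (q.2 < i)) mis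
      = pvGreedyGo z i suf used mis := by
  intro suf
  induction suf with
  | nil =>
    intro i used mis hdrop
    have hle : z.length ≤ i := by
      by_contra hlt
      have := congrArg List.length hdrop
      simp at this
      omega
    have hk : ((pvPool z used).countP fun q => decide (q.2 < i)) = (pvPool z used).length := by
      apply List.countP_eq_length.mpr
      intro q hq
      have := pvPool_snd_lt z used q hq
      simp
      omega
    rw [hk, pvLoopB]
    simp [pvGreedyGo]
  | cons hd rest ih =>
    intro i used mis hdrop
    have hip : i < z.length := by
      by_contra hge
      rw [List.drop_eq_nil_of_le (by omega)] at hdrop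
      exact (List.cons_ne_nil _ _) hdrop.symm
    have hdz : z.drop i = z[i] :: z.drop (i+1) := List.drop_eq_getElem_cons hip
    have hhd : z[i] = hd := by
      rw [hdrop] at hdz
      exact (List.cons_eq_cons.mp hdz.symm).1
    have hrest : z.drop (i+1) = rest := by
      rw [hdrop] at hdz
      exact (List.cons_eq_cons.mp hdz.symm).2
    have hgo : pvGreedyGo z i (hd :: rest) used mis =
        (if (hd.1 == hd.2 || used.contains i) = true then pvGreedyGo z (i+1) rest used mis
         else match (pvPosFrom hd.1 0 z).filter (fun j => !used.contains j) with
           | [] => pvGreedyGo z (i+1) rest used mis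
           | j :: _ => pvGreedyGo z (i+1) rest (used.add j) (mis+1)) := by
      rw [pvGreedyGo]
    by_cases hskip : (hd.1 == hd.2 || used.contains i) = true
    · -- skipped position: the worklist and the cursor value are unchanged
      rw [hgo, if_pos hskip]
      have hknext : ((pvPool z used).countP fun q => decide (q.2 < i))
          = ((pvPool z used).countP fun q => decide (q.2 < i+1)) := by
        apply List.countP_congr
        intro q hq
        have hqi : q.2 ≠ i := by
          intro hqi
          obtain ⟨hz1, hz2, hz3⟩ := pvPool_at z used hq
          rw [hqi] at hz1 hz3
          have hq1 : q.1 = z[i] := by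
            have := List.getElem?_eq_getElem hip
            rw [this] at hz1
            simpa using hz1.symm
          rw [hq1] at hz2
          rw [hhd] at hz2
          rcases Bool.or_eq_true_iff.mp hskip with h | h
          · rw [hz2] at h; exact absurd h (by decide)
          · rw [hz3] at h; exact absurd h (by decide)
        by_cases hlt : q.2 < i
        · simp [hlt, Nat.lt_succ_of_lt hlt]
        · have h2 : ¬ q.2 < i + 1 := by omega
          simp [hlt, h2]
      rw [hknext]
      exact ih (i+1) used mis hrest
    · -- pending non-exact position: one worklist step
      rw [hgo, if_neg hskip]
      have hex : (hd.1 == hd.2) = false := by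
        cases h : (hd.1 == hd.2)
        · rfl
        · exact absurd (by rw [h]; simp) hskip
      have hu : used.contains i = false := by
        cases h : used.contains i
        · rfl
        · exact absurd (by rw [h]; simp) hskip
      have hp : (pvPool z used).Pairwise (fun x y => x.2 < y.2) := pvPool_pairwise z used
      have he : (hd, i) ∈ pvPool z used := by
        have := pvPool_mem_self z used i hip (by rw [hhd]; exact hex) hu
        rwa [hhd] at this
      have hsplit : pvPool z used
          = ((pvPool z used).filter fun q => decide (q.2 < i))
            ++ (hd, i) :: ((pvPool z used).filter fun q => decide (i < q.2)) :=
        pvSplitAt (pvPool z used) (hd, i) he hp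
      set L := (pvPool z used).filter (fun q => decide (q.2 < i)) with hLdef
      set R := (pvPool z used).filter (fun q => decide (i < q.2)) with hRdef
      have hLlt : ∀ q ∈ L, q.2 < i := by
        intro q hq
        simpa using List.of_mem_filter hq
      have hRgt : ∀ q ∈ R, i < q.2 := by
        intro q hq
        simpa using List.of_mem_filter hq
      have hk : ((pvPool z used).countP fun q => decide (q.2 < i)) = L.length :=
        List.countP_eq_length_filter ..
      have hpool : (pvPool z used).map (·.1) = L.map (·.1) ++ hd :: R.map (·.1) := by
        conv_lhs => rw [hsplit]
        simp
      have hlen : (pvPool z used).length = L.length + 1 + R.length := by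
        conv_lhs => rw [hsplit]
        simp
        omega
      have hklt : L.length < ((pvPool z used).map (·.1)).length := by
        rw [List.length_map]
        omega
      have hpoolk : ((pvPool z used).map (·.1))[L.length]'hklt = hd := by
        rw [List.getElem_of_eq hpool]
        rw [List.getElem_append_right (by simp)]
        simp
      have hmapfilter : ∀ (X : List ((Int × Int) × Nat)),
          (X.map (·.1)).filter (fun x => x.2 == hd.1)
            = (X.filter fun q => q.1.2 == hd.1).map (·.1) := by
        intro X
        rw [List.filter_map]
        rfl
      have hnoneiff : ∀ (X : List ((Int × Int) × Nat)),
          (pvHit hd.1 (X.map (·.1)) = none ↔ X.filter (fun q => q.1.2 == hd.1) = []) := by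
        intro X
        rw [pvHit_none_iff, hmapfilter X, List.map_eq_nil_iff]
      have hfP : (pvPool z used).filter (fun q => q.1.2 == hd.1)
          = (L.filter fun q => q.1.2 == hd.1) ++ (R.filter fun q => q.1.2 == hd.1) := by
        conv_lhs => rw [hsplit]
        have hpr : ((hd, i).1.2 == hd.1) = false := by
          have hne : hd.1 ≠ hd.2 := by simpa using hex
          simpa using fun h => hne h.symm
        rw [List.filter_append, List.filter_cons]
        simp [hpr]
      rw [hk, pvSpecList]
      cases hLf : L.filter (fun q => q.1.2 == hd.1) with
      | cons qs ltail =>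
        -- the claimed entry lies before the cursor: the cursor stays put
        have hLne : L.filter (fun q => q.1.2 == hd.1) ≠ [] := by rw [hLf]; simp
        obtain ⟨h1, hH1⟩ : ∃ h1, pvHit hd.1 (L.map (·.1)) = some h1 := by
          cases hh : pvHit hd.1 (L.map (·.1)) with
          | none => exact absurd ((hnoneiff L).mp hh) hLne
          | some h1 => exact ⟨h1, rfl⟩
        have hh1lt : h1 < L.length := by
          have := pvHit_lt_length hd.1 (L.map (·.1)) h1 hH1
          simpa using this
        have hHpool : pvHit hd.1 ((pvPool z used).map (·.1)) = some h1 := by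
          rw [hpool, pvHit_append, hH1]
        have hsc : pvHit ((((pvPool z used).map (fun x : (Int × Int) × Nat => x.1))[L.length]'hklt).1) ((pvPool z used).map (fun x : (Int × Int) × Nat => x.1)) = some h1 := by
          rw [hpoolk]
          exact hHpool
        rw [pvLoopB_some _ _ _ _ hklt hsc, if_neg (by omega), hfP, hLf]
        simp only [List.cons_append, List.map_cons]
        have hqsL : qs ∈ L := List.mem_of_mem_filter (by rw [hLf]; exact List.mem_cons_self)
        have hqslt : qs.2 < i := hLlt qs hqsL
        have hfind : (pvPool z used).find? (fun q => q.1.2 == hd.1) = some qs := by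
          rw [← List.head?_filter, hfP, hLf]
          simp
        have hErase : ((pvPool z used).map (·.1)).eraseIdx h1
            = (pvPool z (used.add qs.2)).map (·.1) := by
          rw [pvHit_eraseIdx hd.1 _ h1 hHpool, List.eraseP_map]
          simp only [Function.comp_def]
          rw [pvErasePIdx (pvPool z used) hp qs hfind, ← pvPool_add]
        have hpL : L.Pairwise (fun x y => x.2 < y.2) := hp.sublist List.filter_sublist
        have hLsplit := pvSplitAt L qs hqsL hpL
        have hknew : (pvPool z (used.add qs.2)).countP (fun q => decide (q.2 < i+1)) = L.length := by
          rw [pvPool_add, List.countP_filter]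
          conv_lhs => rw [hsplit]
          rw [List.countP_append, List.countP_cons]
          have hLaLb : L.countP (fun q => decide (q.2 < i+1) && !(q.2 == qs.2)) = L.length - 1 := by
            conv_lhs => rw [hLsplit]
            rw [List.countP_append, List.countP_cons]
            have hca : (L.filter fun q => decide (q.2 < qs.2)).countP
                (fun q => decide (q.2 < i+1) && !(q.2 == qs.2))
                = (L.filter fun q => decide (q.2 < qs.2)).length := by
              apply List.countP_eq_length.mpr
              intro q hq
              have h1 : q.2 < qs.2 := by simpa using List.of_mem_filter hq
              have h2 : q.2 < i := hLlt q (List.mem_of_mem_filter hq)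
              simp only [Bool.and_eq_true, decide_eq_true_eq, bne_iff_ne, ne_eq,
                Bool.not_eq_true', beq_eq_false_iff_ne]
              omega
            have hcb : (L.filter fun q => decide (qs.2 < q.2)).countP
                (fun q => decide (q.2 < i+1) && !(q.2 == qs.2))
                = (L.filter fun q => decide (qs.2 < q.2)).length := by
              apply List.countP_eq_length.mpr
              intro q hq
              have h1 : qs.2 < q.2 := by simpa using List.of_mem_filter hq
              have h2 : q.2 < i := hLlt q (List.mem_of_mem_filter hq)
              simp only [Bool.and_eq_true, decide_eq_true_eq, bne_iff_ne, ne_eq,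
                Bool.not_eq_true', beq_eq_false_iff_ne]
              omega
            have hqs0 : (decide (qs.2 < i+1) && !(qs.2 == qs.2)) = false := by simp
            have hlenL : L.length = (L.filter fun q => decide (q.2 < qs.2)).length + 1
                + (L.filter fun q => decide (qs.2 < q.2)).length := by
              conv_lhs => rw [hLsplit]
              simp
              omega
            rw [hca, hcb, hqs0]
            simp
            omega
          have hcR : R.countP (fun q => decide (q.2 < i+1) && !(q.2 == qs.2)) = 0 := by
            apply List.countP_eq_zero.mpr
            intro q hq
            have := hRgt q hq
            simp only [Bool.and_eq_true, decide_eq_true_eq, not_and]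
            omega
          have hL1 : 1 ≤ L.length := List.length_pos_iff.mpr (List.ne_nil_of_mem hqsL)
          have hne : ((i : Nat) == qs.2) = false := by
            simp
            omega
          rw [hLaLb, hcR]
          simp [hne]
          omega
        rw [hErase, ← hknew]
        exact ih (i+1) (used.add qs.2) (mis+1) hrest
      | nil =>
        have hH1 : pvHit hd.1 (L.map (·.1)) = none := (hnoneiff L).mpr hLf
        have hhdpred : (hd.2 == hd.1) = false := by
          have hne : hd.1 ≠ hd.2 := by simpa using hex
          simpa using fun h => hne h.symm
        cases hRf : R.filter (fun q => q.1.2 == hd.1) with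
        | nil =>
          -- no entry carries this letter: the cursor advances
          have hH2 : pvHit hd.1 (R.map (·.1)) = none := (hnoneiff R).mpr hRf
          have hHpool : pvHit hd.1 ((pvPool z used).map (·.1)) = none := by
            rw [hpool, pvHit_append, hH1]
            simp only [pvHit, hhdpred, Bool.false_eq_true, if_false, hH2, Option.map_none]
          have hsc : pvHit ((((pvPool z used).map (fun x : (Int × Int) × Nat => x.1))[L.length]'hklt).1) ((pvPool z used).map (fun x : (Int × Int) × Nat => x.1)) = none := by
            rw [hpoolk]
            exact hHpool
          rw [pvLoopB_none _ _ _ hklt hsc, hfP, hLf, hRf]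
          simp only [List.nil_append, List.map_nil]
          have hknew : (pvPool z used).countP (fun q => decide (q.2 < i+1)) = L.length + 1 := by
            conv_lhs => rw [hsplit]
            rw [List.countP_append, List.countP_cons]
            have hcL : L.countP (fun q => decide (q.2 < i+1)) = L.length := by
              apply List.countP_eq_length.mpr
              intro q hq
              have := hLlt q hq
              simp
              omega
            have hcR : R.countP (fun q => decide (q.2 < i+1)) = 0 := by
              apply List.countP_eq_zero.mpr
              intro q hq
              have := hRgt q hq
              simp
              omega
            rw [hcL, hcR]
            simp
          rw [← hknew]
          exact ih (i+1) used mis hrest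
        | cons qs rtail =>
          -- the claimed entry lies after the cursor: it vanishes from the pending part
          have hRne : R.filter (fun q => q.1.2 == hd.1) ≠ [] := by rw [hRf]; simp
          obtain ⟨h2, hH2⟩ : ∃ h2, pvHit hd.1 (R.map (·.1)) = some h2 := by
            cases hh : pvHit hd.1 (R.map (·.1)) with
            | none => exact absurd ((hnoneiff R).mp hh) hRne
            | some h2 => exact ⟨h2, rfl⟩
          have hHpool : pvHit hd.1 ((pvPool z used).map (·.1))
              = some (h2 + 1 + (L.map (·.1)).length) := by
            rw [hpool, pvHit_append, hH1]
            simp only [pvHit, hhdpred, Bool.false_eq_true, if_false, hH2, Option.map_some]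
          have hsc : pvHit ((((pvPool z used).map (fun x : (Int × Int) × Nat => x.1))[L.length]'hklt).1) ((pvPool z used).map (fun x : (Int × Int) × Nat => x.1)) = some (h2 + 1 + (L.map (·.1)).length) := by
            rw [hpoolk]
            exact hHpool
          have hgt : h2 + 1 + (L.map (·.1)).length > L.length := by
            simp
          rw [pvLoopB_some _ _ _ _ hklt hsc, if_pos hgt, hfP, hLf, hRf]
          simp only [List.nil_append, List.map_cons]
          have hqsR : qs ∈ R := List.mem_of_mem_filter (by rw [hRf]; exact List.mem_cons_self)
          have hqsgt : i < qs.2 := hRgt qs hqsR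
          have hfind : (pvPool z used).find? (fun q => q.1.2 == hd.1) = some qs := by
            rw [← List.head?_filter, hfP, hLf, hRf]
            simp
          have hErase : ((pvPool z used).map (·.1)).eraseIdx (h2 + 1 + (L.map (·.1)).length)
              = (pvPool z (used.add qs.2)).map (·.1) := by
            rw [pvHit_eraseIdx hd.1 _ _ hHpool, List.eraseP_map]
            simp only [Function.comp_def]
            rw [pvErasePIdx (pvPool z used) hp qs hfind, ← pvPool_add]
          have hknew : (pvPool z (used.add qs.2)).countP (fun q => decide (q.2 < i+1))
              = L.length + 1 := by
            rw [pvPool_add, List.countP_filter]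
            conv_lhs => rw [hsplit]
            rw [List.countP_append, List.countP_cons]
            have hcL : L.countP (fun q => decide (q.2 < i+1) && !(q.2 == qs.2)) = L.length := by
              apply List.countP_eq_length.mpr
              intro q hq
              have := hLlt q hq
              simp only [Bool.and_eq_true, decide_eq_true_eq, Bool.not_eq_true', beq_eq_false_iff_ne]
              exact ⟨by omega, by omega⟩
            have hcR : R.countP (fun q => decide (q.2 < i+1) && !(q.2 == qs.2)) = 0 := by
              apply List.countP_eq_zero.mpr
              intro q hq
              have := hRgt q hq
              simp only [Bool.and_eq_true, decide_eq_true_eq, not_and]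
              omega
            have hne : ((i : Nat) == qs.2) = false := by
              simp
              omega
            rw [hcL, hcR]
            simp [hne]
          rw [hErase, ← hknew]
          exact ih (i+1) (used.add qs.2) (mis+1) hrest

-- ===== VERDICT (by name: the statement is the Claim_ definition above) =====
theorem is_possible_combo_spec : Claim_equal_is_possible_combo := by
  unfold Claim_equal_is_possible_combo
  intro p r c _hDom hPre
  obtain ⟨hr, hE⟩ := hPre
  unfold Spec_is_possible_combo
  cases r with
  | nil => exact absurd rfl hr
  | cons r0 rt =>
    unfold is_possible_combo is_possible_combo_alt
    have h0 : PySem.List.pyGet? (r0 :: rt) (0 : Int) = some r0 := PySem.List.pyGet?_zero_cons r0 rt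
    rw [h0]
    have hcount : (((p.zip c).map (fun ab => ab.1 == ab.2)).count true : Int)
        = ((p.zip c).countP (fun ab => ab.1 == ab.2) : Int) := by
      rw [pvMaskCount]
    by_cases hEq : (((p.zip c).countP (fun ab => ab.1 == ab.2) : Nat) : Int) = r0
    · obtain ⟨hlen, hlr⟩ := hE (by simpa using hEq)
      cases rt with
      | nil => simp at hlr
      | cons r1 rt' =>
        have h1 : PySem.List.pyGet? (r0 :: r1 :: rt') (1 : Int) = some r1 := by
          have h10 : ((1 : Nat) : Int) = (1 : Int) := by norm_num
          rw [← h10, PySem.List.pyGet?_natCast]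
          rfl
        have hbne1 : ((((p.zip c).map (fun ab => ab.1 == ab.2)).count true : Int) != r0) = false := by
          simp [hcount, hEq]
        have hbne2 : ((((p.zip c).countP fun ab => ab.1 == ab.2 : Nat) : Int) != r0) = false := by
          simp [hEq]
        simp only [hbne1, hbne2, Bool.false_eq_true, if_false, h1]
        have hsimA := pvLoop_sim p c hlen p 0 ((p.zip c).map (fun ab => ab.1 == ab.2))
          PySem.Set.empty 0 rfl (pvInv_init p c)
        rw [List.drop_zero] at hsimA
        have hsimB := pvB_sim (p.zip c) (p.zip c) 0 PySem.Set.empty 0 (by simp)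
        have hpool0 : (pvPool (p.zip c) PySem.Set.empty).map (·.1)
            = (p.zip c).filter fun ab => !(ab.1 == ab.2) := by
          rw [pvPool_empty, pvW_map_fst]
        have hcnt0 : ((pvPool (p.zip c) PySem.Set.empty).countP fun q => decide (q.2 < 0)) = 0 := by
          apply List.countP_eq_zero.mpr
          intro q _
          simp
        rw [hpool0, hcnt0] at hsimB
        rw [hsimA, ← hsimB]
    · have hbne1 : ((((p.zip c).map (fun ab => ab.1 == ab.2)).count true : Int) != r0) = true := by
        simp [hcount]
        omega
      have hbne2 : ((((p.zip c).countP fun ab => ab.1 == ab.2 : Nat) : Int) != r0) = true := by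
        simp
        omega
      simp only [hbne1, hbne2, if_true]
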